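-- pv_equiv track=rewrite | github.com/qqweqwqweqwe/todoapp | 프로그래머스/단계2/괄호 변환.py | cannotbeseperate
-- ===== SOURCE A (Python) =====
-- def cannotbeseperate(s:str):
--   total=0
--   for i in range(len(s)):
--     if s[i]=='(':
--       total+=1
--     else:
--       total-=1
--     if total==0 and i!=len(s)-1:
--       return False
--   return True
-- ===== SOURCE B (Python) =====
-- def cannotbeseperate(s: str):
--     total = sum(1 if c == '(' else -1 for c in s)
--     suf = 0
--     for c in reversed(s[1:]):
--         suf += 1 if c == '(' else -1
--         if suf == total:
--             return False
--     return True
-- ===== Notes on version B (the rewrite author's own statement) =====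
-- stated objective: alternative
-- what changed: B precomputes the total balance, then scans the string right-to-left accumulating suffix balances and returns False when a proper suffix's balance equals the total (equivalent to a proper prefix balancing to 0), instead of A's left-to-right indexed prefix-balance loop with a last-position test.
import Mathlib
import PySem

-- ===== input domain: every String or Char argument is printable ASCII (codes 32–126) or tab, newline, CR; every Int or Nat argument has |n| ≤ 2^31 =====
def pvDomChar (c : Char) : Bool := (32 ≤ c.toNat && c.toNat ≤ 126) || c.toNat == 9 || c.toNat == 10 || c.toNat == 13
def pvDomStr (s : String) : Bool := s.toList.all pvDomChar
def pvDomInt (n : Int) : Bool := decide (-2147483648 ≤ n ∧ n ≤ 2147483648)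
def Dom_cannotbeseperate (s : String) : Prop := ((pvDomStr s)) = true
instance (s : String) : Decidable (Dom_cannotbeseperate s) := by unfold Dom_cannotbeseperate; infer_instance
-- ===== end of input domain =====

-- B precomputes the total balance and scans right-to-left over suffix balances (suffix balance = total
-- iff the complementary prefix balances to 0), instead of A's left-to-right indexed prefix loop;
-- objective: alternative, same O(n) cost.


-- shared helper: the +1/-1 weight of one character ('1 if c == '(' else -1')
def pvDelta (c : Char) : Int := if c = '(' then 1 else -1

-- ===== PORT A =====
-- structural recursion over the characters, tracking the loop index i and n = len(s);
-- the early 'return False' becomes the false branch of the if.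
def pvLoopA : List Char → Int → Nat → Nat → Bool
  | [], _, _, _ => true
  | c :: rest, total, i, n =>
    let total := if c = '(' then total + 1 else total - 1
    if total = 0 ∧ i ≠ n - 1 then false else pvLoopA rest total (i + 1) n

def cannotbeseperate (s : String) : Bool :=
  pvLoopA s.toList 0 0 s.toList.length

-- ===== PORT B =====
-- 'total = sum(1 if c == '(' else -1 for c in s)'
def pvTotal (l : List Char) : Int := (l.map pvDelta).sum

-- the 'for c in reversed(s[1:])' loop with accumulator suf and early 'return False'
def pvSufLoop : List Char → Int → Int → Bool
  | [], _, _ => true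
  | c :: rest, suf, tot =>
    let suf := suf + pvDelta c
    if suf = tot then false else pvSufLoop rest suf tot

-- s[1:] with nonnegative start index is exactly List.drop 1; reversed(..) is List.reverse
def cannotbeseperate_alt (s : String) : Bool :=
  pvSufLoop (s.toList.drop 1).reverse 0 (pvTotal s.toList)

-- ===== PRECONDITION & SPEC =====
def Spec_cannotbeseperate (s : String) (out : Bool) : Prop := out = cannotbeseperate_alt s
instance (s : String) (out : Bool) : Decidable (Spec_cannotbeseperate s out) := by unfold Spec_cannotbeseperate; infer_instance

-- ===== CLAIM (what is proved, stated in full; the proofs are below) =====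
def Claim_equal_cannotbeseperate : Prop := ∀ (s : String), Dom_cannotbeseperate s → Spec_cannotbeseperate s (cannotbeseperate s)

-- ===== LEMMAS AND PROOFS =====

theorem pvTotal_cons (c : Char) (l : List Char) : pvTotal (c :: l) = pvDelta c + pvTotal l := by
  simp [pvTotal]

theorem pvTotal_reverse (l : List Char) : pvTotal l.reverse = pvTotal l := by
  simp [pvTotal]

theorem pvTotal_take_drop (l : List Char) (j : Nat) :
    pvTotal (l.take j) + pvTotal (l.drop j) = pvTotal l := by
  conv_rhs => rw [← l.take_append_drop j]
  simp [pvTotal]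

-- characterisation of A's loop: true iff no proper nonempty prefix brings the balance to 0
theorem pvLoopA_iff (cs : List Char) (total : Int) (i n : Nat) (h : i + cs.length = n) :
    pvLoopA cs total i n = true ↔
      ∀ k, 0 < k → k < cs.length → total + pvTotal (cs.take k) ≠ 0 := by
  induction cs generalizing total i with
  | nil => simp [pvLoopA]
  | cons c rest ih =>
    have har : (if c = '(' then total + 1 else total - 1) = total + pvDelta c := by
      simp only [pvDelta]; split <;> ring
    simp only [pvLoopA, har]
    cases rest with
    | nil =>
      have hi : i = n - 1 := by simp at h; omega
      simp [hi, pvLoopA]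
      intro k hk hk1; omega
    | cons d rs =>
      have hne : i ≠ n - 1 := by simp at h; omega
      by_cases h0 : total + pvDelta c = 0
      · simp only [h0, hne, ne_eq, not_false_iff, and_true, if_true]
        constructor
        · intro hfalse; cases hfalse
        · intro hall
          exact absurd (by simpa [pvTotal_cons, pvTotal] using h0)
            (hall 1 (by omega) (by simp))
      · have h' : (i + 1) + (d :: rs).length = n := by simp at h ⊢; omega
        simp only [h0, false_and, if_false]
        rw [ih (total + pvDelta c) (i + 1) h']
        constructor
        · intro hall k hk hklen
          match k, hk with
          | 1, _ =>
            simpa [pvTotal_cons, pvTotal] using h0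
          | (j+2), _ =>
            have := hall (j+1) (by omega) (by simp at hklen ⊢; omega)
            simp only [List.take_succ_cons, pvTotal_cons] at this ⊢
            omega
        · intro hall k hk hklen
          have := hall (k+1) (by omega) (by simp at hklen ⊢; omega)
          simp only [List.take_succ_cons, pvTotal_cons] at this
          omega

-- characterisation of B's loop: true iff no nonempty prefix of the scanned list reaches tot
theorem pvSufLoop_iff (rs : List Char) (suf tot : Int) :
    pvSufLoop rs suf tot = true ↔
      ∀ k, 0 < k → k ≤ rs.length → suf + pvTotal (rs.take k) ≠ tot := by
  induction rs generalizing suf with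
  | nil => simp [pvSufLoop]; intro k hk hk0; omega
  | cons c rest ih =>
    simp only [pvSufLoop]
    by_cases h0 : suf + pvDelta c = tot
    · simp only [h0, if_true]
      constructor
      · intro hfalse; cases hfalse
      · intro hall
        exact absurd (by simpa [pvTotal_cons, pvTotal] using h0)
          (hall 1 (by omega) (by simp))
    · simp only [h0, if_false]
      rw [ih (suf + pvDelta c)]
      constructor
      · intro hall k hk hklen
        match k, hk with
        | 1, _ => simpa [pvTotal_cons, pvTotal] using h0
        | (j+2), _ =>
          have := hall (j+1) (by omega) (by simp at hklen ⊢; omega)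
          simp only [List.take_succ_cons, pvTotal_cons] at this ⊢
          omega
      · intro hall k hk hklen
        have := hall (k+1) (by omega) (by simp at hklen ⊢; omega)
        simp only [List.take_succ_cons, pvTotal_cons] at this
        omega

-- a prefix of the reversed tail is a reversed suffix of the whole list
theorem pvTake_rev_tail (l : List Char) (k : Nat) (hk1 : 0 < k) (hk2 : k ≤ l.length - 1) :
    pvTotal (((l.drop 1).reverse).take k) = pvTotal (l.drop (l.length - k)) := by
  rw [List.take_reverse, pvTotal_reverse, List.drop_drop]
  congr 2
  simp only [List.length_drop]
  omega

-- ===== VERDICT (by name: the statement is the Claim_ definition above) =====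
theorem cannotbeseperate_spec : Claim_equal_cannotbeseperate := by
  intro s _
  unfold Spec_cannotbeseperate cannotbeseperate cannotbeseperate_alt
  set l := s.toList with hl
  rw [Bool.eq_iff_iff,
    pvLoopA_iff l 0 0 l.length (by simp),
    pvSufLoop_iff]
  constructor
  · intro hall k hk hklen
    simp only [List.length_reverse, List.length_drop] at hklen
    rw [pvTake_rev_tail l k hk hklen]
    have hj1 : 0 < l.length - k := by omega
    have hj2 : l.length - k < l.length := by omega
    have := hall (l.length - k) hj1 hj2
    have hs := pvTotal_take_drop l (l.length - k)
    omega
  · intro hall k hk hklen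
    have hk' : 0 < l.length - k ∧ l.length - k ≤ l.length - 1 := by omega
    have := hall (l.length - k) hk'.1
      (by simp only [List.length_reverse, List.length_drop]; omega)
    rw [pvTake_rev_tail l (l.length - k) hk'.1 hk'.2] at this
    have hnk : l.length - (l.length - k) = k := by omega
    rw [hnk] at this
    have hs := pvTotal_take_drop l k
    omega
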